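-- pv_equiv track=rewrite | github.com/HugoANDRIAMAMPIANINA/gg.start | bracket.py | generate_bracket_order
-- ===== SOURCE A (Python) =====
-- def generate_bracket_order(n):
--     """
--     Generate the correct spatial ordering for tournament bracket matches.
--
--     Args:
--         n: Number of matches (must be a power of 2)
--
--     Returns:
--         List of indices representing the correct bracket order
--
--     Example:
--         For n=4: returns [0, 3, 1, 2]
--         For n=8: returns [0, 7, 3, 4, 1, 6, 2, 5]
--     """
--     if n == 1:
--         return [0]
--
--     # Get order for half the size (recursive)
--     sub_order = generate_bracket_order(n // 2)
--
--     result = []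
--     for idx in sub_order:
--         # Add the index from first half
--         result.append(idx)
--         # Add its mirror from second half
--         result.append(n - 1 - idx)
--
--     return result
-- ===== SOURCE B (Python) =====
-- def generate_bracket_order(n):
--     # Bottom-up: record the chain of sizes n, n//2, ..., 2, then fold upward
--     # from [0], doubling with mirrors at each size.
--     sizes = []
--     m = n
--     while m != 1:
--         sizes.append(m)
--         m //= 2
--     order = [0]
--     for size in reversed(sizes):
--         order = [x for idx in order for x in (idx, size - 1 - idx)]
--     return order
-- ===== Notes on version B (the rewrite author's own statement) =====
-- stated objective: alternative
-- what changed: Replaces A's top-down recursion with an iterative bottom-up construction: first record the size chain n, n//2, ..., 2 with a while loop, then fold upward from [0], expanding each order with mirror indices via a comprehension.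
import Mathlib
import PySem

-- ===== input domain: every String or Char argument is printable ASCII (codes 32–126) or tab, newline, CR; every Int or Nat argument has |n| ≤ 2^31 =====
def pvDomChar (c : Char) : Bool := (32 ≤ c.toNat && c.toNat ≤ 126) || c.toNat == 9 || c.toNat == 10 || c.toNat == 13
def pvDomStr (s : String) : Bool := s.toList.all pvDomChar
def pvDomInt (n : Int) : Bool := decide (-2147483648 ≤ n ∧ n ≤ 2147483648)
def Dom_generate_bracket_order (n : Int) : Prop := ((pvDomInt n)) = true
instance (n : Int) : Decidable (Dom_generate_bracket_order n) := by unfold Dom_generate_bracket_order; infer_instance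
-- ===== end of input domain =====

-- B replaces A's top-down recursion by an iterative bottom-up fold over the halving size chain; same output, same cost.

-- ===== PORT A =====
-- For n < 1 the Python recursion never reaches the base case (RecursionError);
-- the 'n ≤ 0' guard only makes the port total there (excluded by Pre_).
def generate_bracket_order (n : Int) : List Int :=
  if n == 1 then [0]
  else if h : n ≤ 0 then []
  else
    let sub_order := generate_bracket_order (PySem.Int.floordiv n 2)
    sub_order.foldl (fun result idx => result ++ [idx] ++ [n - 1 - idx]) []
termination_by n.toNat
decreasing_by
  rw [PySem.Int.floordiv_eq_ediv_of_pos (by omega)]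
  omega

-- ===== PORT B =====
-- the while loop collecting sizes n, n//2, ..., 2 ('m ≤ 0' guard: totality only, Python diverges there, excluded by Pre_)
def pvSizeChain (m : Int) : List Int :=
  if m == 1 then []
  else if h : m ≤ 0 then []
  else m :: pvSizeChain (PySem.Int.floordiv m 2)
termination_by m.toNat
decreasing_by
  rw [PySem.Int.floordiv_eq_ediv_of_pos (by omega)]
  omega

def generate_bracket_order_alt (n : Int) : List Int :=
  (pvSizeChain n).reverse.foldl
    (fun order size => order.flatMap (fun idx => [idx, size - 1 - idx])) [0]

-- ===== PRECONDITION & SPEC =====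
-- Pre_ excludes n < 1, where Python A raises RecursionError (and B's while loop diverges).
def Pre_generate_bracket_order (n : Int) : Prop := 1 ≤ n
instance (n : Int) : Decidable (Pre_generate_bracket_order n) := by unfold Pre_generate_bracket_order; infer_instance
def pvWitness_generate_bracket_order : Int := 8

def Spec_generate_bracket_order (n : Int) (out : List Int) : Prop := out = generate_bracket_order_alt n
instance (n : Int) (out : List Int) : Decidable (Spec_generate_bracket_order n out) := by unfold Spec_generate_bracket_order; infer_instance

-- ===== CLAIM =====
def Claim_equal_generate_bracket_order : Prop := ∀ (n : Int), Dom_generate_bracket_order n → Pre_generate_bracket_order n → Spec_generate_bracket_order n (generate_bracket_order n)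

-- ===== LEMMAS AND PROOFS =====

-- A's inner append-two loop is the mirror flatMap.
theorem pvFoldl_mirror (n : Int) (xs : List Int) (acc : List Int) :
    xs.foldl (fun result idx => result ++ [idx] ++ [n - 1 - idx]) acc
      = acc ++ xs.flatMap (fun idx => [idx, n - 1 - idx]) := by
  induction xs generalizing acc with
  | nil => simp
  | cons x xs ih => simp [List.foldl_cons, ih, List.flatMap_cons, List.append_assoc, List.flatMap_def]

-- the strong-induction core: A agrees with B's bottom-up fold
theorem pvMain (k : Nat) : ∀ (n : Int), n.toNat ≤ k → 1 ≤ n →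
    generate_bracket_order n = generate_bracket_order_alt n := by
  induction k with
  | zero => intro n hk h1; omega
  | succ k ih =>
    intro n hk h1
    by_cases hone : n = 1
    · subst hone
      rw [generate_bracket_order, generate_bracket_order_alt, pvSizeChain]
      simp
    · have hpos : ¬ n ≤ 0 := by omega
      have hfd : PySem.Int.floordiv n 2 = n / 2 :=
        PySem.Int.floordiv_eq_ediv_of_pos (by omega)
      rw [generate_bracket_order, generate_bracket_order_alt, pvSizeChain]
      simp only [hone, hpos, beq_iff_eq, if_false, dite_false]
      rw [pvFoldl_mirror, List.nil_append, List.reverse_cons, List.foldl_append,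
          ih (PySem.Int.floordiv n 2) (by rw [hfd]; omega) (by rw [hfd]; omega)]
      rfl

-- ===== VERDICT =====
theorem generate_bracket_order_spec : Claim_equal_generate_bracket_order := by
  intro n _ hpre
  exact pvMain n.toNat n le_rfl hpre
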